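-- pv_equiv track=rewrite | github.com/TreeLLi/inner-detectors | src/indr_matcher.py | retainLayers
-- ===== SOURCE A (Python) =====
-- def retainLayers(ramap, layers):
--     retained = {}
--     for layer in layers:
--         exist = False
--         for unit_id, m in ramap.items():
--             if layer in unit_id:
--                 retained[unit_id] = m
--                 exist = True
--         if not exist:
--             raise Exception("Exception: fast mode - incompleted stored data lacking layer {}"
--                             .format(layer))
--     return retained
-- ===== SOURCE B (Python) =====
-- def retainLayers(ramap, layers):
--     # entry-major: assign each unit to the bucket of its FIRST matching layer,
--     # then check every layer matched, then flatten the buckets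
--     buckets = [[] for _ in layers]
--     for unit_id, m in ramap.items():
--         for i, layer in enumerate(layers):
--             if layer in unit_id:
--                 buckets[i].append((unit_id, m))
--                 break
--     for layer in layers:
--         if not any(layer in unit_id for unit_id in ramap):
--             raise Exception("Exception: fast mode - incompleted stored data lacking layer {}"
--                             .format(layer))
--     return {unit_id: m for bucket in buckets for unit_id, m in bucket}
-- ===== Notes on version B (the rewrite author's own statement) =====
-- stated objective: alternative
-- what changed: Entry-major single pass: each ramap entry is appended to the bucket of its first matching layer (with break), a separate pass checks each layer has a match, and the flattened buckets form the result, replacing A's layer-major nested loop with dict-overwrite deduplication.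
import Mathlib
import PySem

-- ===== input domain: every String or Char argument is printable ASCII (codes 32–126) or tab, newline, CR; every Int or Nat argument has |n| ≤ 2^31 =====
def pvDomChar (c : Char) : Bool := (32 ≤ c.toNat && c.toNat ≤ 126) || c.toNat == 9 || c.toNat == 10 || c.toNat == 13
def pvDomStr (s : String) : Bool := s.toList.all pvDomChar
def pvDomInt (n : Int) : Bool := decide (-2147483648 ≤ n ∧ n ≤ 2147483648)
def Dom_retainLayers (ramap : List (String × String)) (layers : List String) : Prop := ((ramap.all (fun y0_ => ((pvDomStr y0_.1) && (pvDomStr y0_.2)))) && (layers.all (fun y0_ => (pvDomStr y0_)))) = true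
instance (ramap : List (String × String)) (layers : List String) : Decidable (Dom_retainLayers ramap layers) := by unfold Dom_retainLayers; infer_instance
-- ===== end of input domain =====

-- B replaces A's layer-major nested loop (dict overwrite for deduplication) by an
-- entry-major first-matching-layer bucketing pass plus a separate existence check:
-- an alternative decomposition of the same cost. Equivalence is about the return
-- value; where A raises (some layer matched by no unit_id) both programs raise,
-- and those inputs are outside Pre_retainLayers.

-- ===== PORT A =====
-- literal transliteration: retained is a Python dict (PySem.Dict); the inner loop
-- carries the `exist` flag; the `raise` on exist = False is unreachable inside
-- Pre_retainLayers, so the port continues with the accumulated dict there.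
def retainLayers (ramap : List (String × String)) (layers : List String) : List (String × String) :=
  (layers.foldl
    (fun (retained : PySem.Dict String String) layer =>
      (ramap.foldl
        (fun (st : PySem.Dict String String × Bool) p =>
          if PySem.Str.isIn layer p.1 then (st.1.insert p.1 p.2, true) else st)
        (retained, false)).1)
    PySem.Dict.empty).items

-- ===== PORT B =====
-- index of the first layer contained in uid (the inner for/break of Source B)
def pvFirstMatch (layers : List String) (uid : String) : Option Nat :=
  match layers with
  | [] => none
  | l :: rest => if PySem.Str.isIn l uid then some 0 else (pvFirstMatch rest uid).map (· + 1)

def retainLayers_alt (ramap : List (String × String)) (layers : List String) : List (String × String) :=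
  let buckets :=
    ramap.foldl
      (fun (bs : List (List (String × String))) p =>
        match pvFirstMatch layers p.1 with
        | some i => bs.set i (bs.getD i [] ++ [p])
        | none => bs)
      (layers.map fun _ => [])
  -- Source B's second loop only raises (inside Pre_retainLayers no layer lacks a match)
  buckets.flatten

-- ===== PRECONDITION & SPEC =====
-- ramap is a Python dict, so its association-list model has distinct keys (a
-- dup-keyed list represents no Python input); the second conjunct is exactly
-- "A raises on no layer": every layer is contained in some unit_id.
def Pre_retainLayers (ramap : List (String × String)) (layers : List String) : Prop :=
  (ramap.map Prod.fst).Nodup ∧ ∀ l ∈ layers, ∃ p ∈ ramap, PySem.Str.isIn l p.1 = true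
instance (ramap : List (String × String)) (layers : List String) : Decidable (Pre_retainLayers ramap layers) := by unfold Pre_retainLayers; infer_instance

def pvWitness_retainLayers : (List (String × String)) × List String :=
  ([("conv1_unit0", "m0"), ("conv2_unit1", "m1")], ["conv1", "conv2"])

def Spec_retainLayers (ramap : List (String × String)) (layers : List String) (out : List (String × String)) : Prop := out = retainLayers_alt ramap layers
instance (ramap : List (String × String)) (layers : List String) (out : List (String × String)) : Decidable (Spec_retainLayers ramap layers out) := by unfold Spec_retainLayers; infer_instance

-- ===== CLAIM (what is proved, stated in full; the proofs are below) =====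
def Claim_equal_retainLayers : Prop := ∀ (ramap : List (String × String)) (layers : List String), Dom_retainLayers ramap layers → Pre_retainLayers ramap layers → Spec_retainLayers ramap layers (retainLayers ramap layers)

-- ===== LEMMAS AND PROOFS =====
def pvMatchesAny (ls : List String) (uid : String) : Bool := ls.any (fun l => PySem.Str.isIn l uid)

def pvNewly (ramap : List (String × String)) (seen : List String) (l : String) : List (String × String) :=
  ramap.filter (fun p => PySem.Str.isIn l p.1 && !pvMatchesAny seen p.1)

def pvAC (ramap : List (String × String)) (seen : List String) : List String → List (String × String)
  | [] => []
  | l :: rest => pvNewly ramap seen l ++ pvAC ramap (seen ++ [l]) rest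

def pvInner (l : String) (r : List (String × String)) (d : PySem.Dict String String) : PySem.Dict String String :=
  r.foldl (fun d p => if PySem.Str.isIn l p.1 then d.insert p.1 p.2 else d) d

theorem pvInner_cons (l : String) (p : String × String) (r : List (String × String))
    (d : PySem.Dict String String) :
    pvInner l (p :: r) d = pvInner l r (if PySem.Str.isIn l p.1 then d.insert p.1 p.2 else d) := rfl

theorem pvInner_bool (l : String) (r : List (String × String)) (d : PySem.Dict String String) (b : Bool) :
    (r.foldl (fun (st : PySem.Dict String String × Bool) p =>
        if PySem.Str.isIn l p.1 then (st.1.insert p.1 p.2, true) else st) (d, b)).1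
      = pvInner l r d := by
  induction r generalizing d b with
  | nil => rfl
  | cons p r ih =>
    simp only [List.foldl_cons, pvInner]
    split_ifs with h
    · exact ih _ _
    · exact ih _ _

theorem pvInsert_self (d : PySem.Dict String String) (k v : String)
    (hn : d.keys.Nodup) (h : d.get? k = some v) : d.insert k v = d := by
  apply PySem.Dict.ext
  rw [PySem.Dict.items_insert_of_contains d v (by rw [PySem.Dict.contains_eq_isSome_get?, h]; rfl)]
  conv_rhs => rw [← List.map_id d.items]
  apply List.map_congr_left
  intro p hp
  by_cases hk : p.1 = k
  · have := PySem.Dict.get?_of_mem_items d (k := p.1) (v := p.2) hp hn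
    rw [hk, h] at this
    subst hk
    rw [Option.some_inj.mp this]
    simp
  · simp [hk]

theorem pvInner_nodup (l : String) (r : List (String × String)) (d : PySem.Dict String String)
    (hn : d.keys.Nodup) : (pvInner l r d).keys.Nodup := by
  induction r generalizing d with
  | nil => exact hn
  | cons p r ih =>
    rw [pvInner_cons]
    split_ifs with h
    · exact ih _ (PySem.Dict.nodup_keys_insert _ _ _ hn)
    · exact ih _ hn

theorem pvInner_items (l : String) (r : List (String × String)) (d : PySem.Dict String String)
    (hr : (r.map Prod.fst).Nodup) (hn : d.keys.Nodup)
    (hv : ∀ p ∈ r, d.contains p.1 = true → d.get? p.1 = some p.2) :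
    (pvInner l r d).items = d.items ++ r.filter (fun p => PySem.Str.isIn l p.1 && !d.contains p.1) := by
  induction r generalizing d with
  | nil => simp [pvInner]
  | cons p r ih =>
    rw [pvInner_cons, List.filter_cons]
    by_cases h : PySem.Str.isIn l p.1 = true
    · by_cases hc : d.contains p.1 = true
      · have hins : d.insert p.1 p.2 = d := pvInsert_self d _ _ hn (hv p (by simp) hc)
        rw [if_pos h, hins]
        rw [ih d (by simpa using hr.of_cons) hn (fun q hq => hv q (by simp [hq]))]
        simp [hc]
      · rw [if_pos h]
        have hcf : d.contains p.1 = false := by simpa using hc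
        have hitems : (d.insert p.1 p.2).items = d.items ++ [(p.1, p.2)] :=
          PySem.Dict.items_insert_of_not_contains d p.2 hcf
        have hne : ∀ q ∈ r, q.1 ≠ p.1 := by
          intro q hq
          have h2 := hr
          simp only [List.map_cons, List.nodup_cons] at h2
          exact fun hEq => h2.1 (hEq ▸ List.mem_map_of_mem hq)
        have step := ih (d.insert p.1 p.2)
          (by simpa using hr.of_cons)
          (PySem.Dict.nodup_keys_insert _ _ _ hn)
          (fun q hq hcq => by
            rw [PySem.Dict.get?_insert_of_ne d p.2 (hne q hq)]
            apply hv q (by simp [hq])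
            rw [PySem.Dict.contains_insert] at hcq
            simpa [hne q hq] using hcq)
        rw [step, hitems]
        have hfc : r.filter (fun q => PySem.Str.isIn l q.1 && !(d.insert p.1 p.2).contains q.1)
            = r.filter (fun q => PySem.Str.isIn l q.1 && !d.contains q.1) := by
          apply List.filter_congr
          intro q hq
          rw [PySem.Dict.contains_insert]
          have hb : (q.1 == p.1) = false := beq_eq_false_iff_ne.mpr (hne q hq)
          rw [hb, Bool.false_or]
        rw [hfc]
        have h' : PySem.Chars.isIn l.toList p.1.toList = true := by simpa using h
        simp [h', hcf]
    · rw [if_neg h]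
      have h' : PySem.Chars.isIn l.toList p.1.toList = false := by simpa using h
      have hb : (PySem.Str.isIn l p.1 && !d.contains p.1) = false := by
        simp [h']
      rw [hb]
      simp only [if_neg (by simp : ¬ false = true)]
      exact ih d (by simpa using hr.of_cons) hn (fun q hq => hv q (by simp [hq]))

def pvOuter (ramap : List (String × String)) (rest : List String) (d : PySem.Dict String String) :
    PySem.Dict String String :=
  rest.foldl (fun d l => pvInner l ramap d) d

theorem pvMatchesAny_append (seen : List String) (l uid : String) :
    pvMatchesAny (seen ++ [l]) uid = (pvMatchesAny seen uid || PySem.Str.isIn l uid) := by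
  simp [pvMatchesAny]

theorem pvOuter_items (ramap : List (String × String)) (rest : List String) :
    ∀ (seen : List String) (d : PySem.Dict String String),
    (ramap.map Prod.fst).Nodup → d.keys.Nodup →
    (∀ p ∈ ramap, d.contains p.1 = pvMatchesAny seen p.1) →
    (∀ p ∈ ramap, d.contains p.1 = true → d.get? p.1 = some p.2) →
    (pvOuter ramap rest d).items = d.items ++ pvAC ramap seen rest := by
  induction rest with
  | nil => intro seen d _ _ _ _; simp [pvOuter, pvAC]
  | cons l rest ih =>
    intro seen d hram hn hcon hget
    have hd2 : (pvInner l ramap d).items = d.items ++ pvNewly ramap seen l := by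
      rw [pvInner_items l ramap d hram hn (fun p hp => hget p hp)]
      congr 1
      apply List.filter_congr
      intro p hp
      rw [hcon p hp]
    have hn2 : (pvInner l ramap d).keys.Nodup := pvInner_nodup l ramap d hn
    have hkeys2 : (pvInner l ramap d).keys = d.keys ++ (pvNewly ramap seen l).map Prod.fst := by
      show ((pvInner l ramap d).items.map Prod.fst) = _
      rw [hd2, List.map_append]
      rfl
    have hcon2 : ∀ p ∈ ramap, (pvInner l ramap d).contains p.1 = pvMatchesAny (seen ++ [l]) p.1 := by
      intro p hp
      rw [pvMatchesAny_append]
      have hmemnew : p.1 ∈ (pvNewly ramap seen l).map Prod.fst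
          ↔ (PySem.Str.isIn l p.1 && !pvMatchesAny seen p.1) = true := by
        constructor
        · intro hm
          obtain ⟨q, hq, hq1⟩ := List.mem_map.mp hm
          have := List.of_mem_filter hq
          rwa [hq1] at this
        · intro hpred
          exact List.mem_map_of_mem (List.mem_filter.mpr ⟨hp, hpred⟩)
      have hiff : (pvInner l ramap d).contains p.1 = true
          ↔ (pvMatchesAny seen p.1 || PySem.Str.isIn l p.1) = true := by
        rw [PySem.Dict.contains_iff_mem_keys, hkeys2, List.mem_append, hmemnew,
          ← PySem.Dict.contains_iff_mem_keys, hcon p hp]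
        cases hA : pvMatchesAny seen p.1 <;> cases hB : PySem.Str.isIn l p.1 <;> simp
      exact Bool.eq_iff_iff.mpr hiff
    have hget2 : ∀ p ∈ ramap, (pvInner l ramap d).contains p.1 = true →
        (pvInner l ramap d).get? p.1 = some p.2 := by
      intro p hp hc2
      rw [(PySem.Dict.get?_eq_some_iff_mem_items _ _ _ hn2), hd2, List.mem_append]
      by_cases hc : d.contains p.1 = true
      · exact Or.inl (PySem.Dict.mem_items_of_get?_eq_some d (hget p hp hc))
      · right
        rw [hcon2 p hp, pvMatchesAny_append] at hc2
        rw [hcon p hp] at hc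
        have hA : pvMatchesAny seen p.1 = false := by simpa using hc
        rw [hA, Bool.false_or] at hc2
        exact List.mem_filter.mpr ⟨hp, by rw [hc2, hA]; rfl⟩
    have := ih (seen ++ [l]) (pvInner l ramap d) hram hn2 hcon2 hget2
    show (pvOuter ramap rest (pvInner l ramap d)).items = _
    rw [this, hd2, pvAC, List.append_assoc]

theorem retainLayers_eq_pvAC (ramap : List (String × String)) (layers : List String)
    (hram : (ramap.map Prod.fst).Nodup) :
    retainLayers ramap layers = pvAC ramap [] layers := by
  unfold retainLayers
  have hfun : (fun (retained : PySem.Dict String String) layer =>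
      (ramap.foldl
        (fun (st : PySem.Dict String String × Bool) p =>
          if PySem.Str.isIn layer p.1 then (st.1.insert p.1 p.2, true) else st)
        (retained, false)).1)
      = fun d l => pvInner l ramap d :=
    funext fun d => funext fun l => pvInner_bool l ramap d false
  rw [hfun]
  have h0 := pvOuter_items ramap layers [] PySem.Dict.empty hram
    (PySem.Dict.nodup_keys_empty)
    (fun p _ => by simp [pvMatchesAny, PySem.Dict.contains_empty])
    (fun p _ hc => by simp [PySem.Dict.contains_empty] at hc)
  show (pvOuter ramap layers PySem.Dict.empty).items = _
  rw [h0]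
  simp [PySem.Dict.empty]

theorem pvFirstMatch_lt (layers : List String) (uid : String) (i : Nat)
    (h : pvFirstMatch layers uid = some i) : i < layers.length := by
  induction layers generalizing i with
  | nil => simp [pvFirstMatch] at h
  | cons l rest ih =>
    rw [pvFirstMatch] at h
    split_ifs at h with hc
    · simp at h
      simp [List.length_cons]
      omega
    · obtain ⟨j, hj, hji⟩ := Option.map_eq_some_iff.mp h
      have := ih j hj
      simp [List.length_cons]
      omega

def pvFoldB (layers : List String) (r : List (String × String))
    (bs : List (List (String × String))) : List (List (String × String)) :=
  r.foldl
    (fun bs p =>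
      match pvFirstMatch layers p.1 with
      | some i => bs.set i (bs.getD i [] ++ [p])
      | none => bs)
    bs

theorem pvFoldB_length (layers : List String) (r : List (String × String))
    (bs : List (List (String × String))) : (pvFoldB layers r bs).length = bs.length := by
  induction r generalizing bs with
  | nil => rfl
  | cons p r ih =>
    show (pvFoldB layers r _).length = _
    cases h : pvFirstMatch layers p.1 <;> simp [h, ih]

theorem pvFoldB_getD (layers : List String) (r : List (String × String))
    (bs : List (List (String × String))) (j : Nat) (hlen : bs.length = layers.length) :
    (pvFoldB layers r bs).getD j []
      = bs.getD j [] ++ r.filter (fun p => decide (pvFirstMatch layers p.1 = some j)) := by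
  induction r generalizing bs with
  | nil => simp [pvFoldB]
  | cons p r ih =>
    rw [List.filter_cons]
    cases h : pvFirstMatch layers p.1 with
    | none =>
      have : pvFoldB layers (p :: r) bs = pvFoldB layers r bs := by
        show pvFoldB layers r _ = _
        simp [h]
      rw [this, ih bs hlen]
      simp
    | some i =>
      have hstep : pvFoldB layers (p :: r) bs
          = pvFoldB layers r (bs.set i (bs.getD i [] ++ [p])) := by
        show pvFoldB layers r _ = _
        simp [h]
      have hilt : i < bs.length := hlen ▸ pvFirstMatch_lt layers p.1 i h
      rw [hstep, ih _ (by simp [hlen])]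
      by_cases hij : i = j
      · subst hij
        have : (bs.set i (bs.getD i [] ++ [p])).getD i [] = bs.getD i [] ++ [p] := by
          simp [List.getD, hilt]
        rw [this]
        simp [List.append_assoc]
      · have : (bs.set i (bs.getD i [] ++ [p])).getD j [] = bs.getD j [] := by
          simp [List.getD, hij]
        rw [this]
        simp [hij]

theorem pvInitGetD (layers : List String) (j : Nat) :
    ((layers.map fun _ => ([] : List (String × String))).getD j []) = [] := by
  rw [List.getD]
  rw [List.getElem?_map]
  cases layers[j]? <;> rfl

theorem retainLayers_alt_eq_flatMap (ramap : List (String × String)) (layers : List String) :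
    retainLayers_alt ramap layers
      = (List.range layers.length).flatMap
          (fun j => ramap.filter (fun p => decide (pvFirstMatch layers p.1 = some j))) := by
  show (pvFoldB layers ramap (layers.map fun _ => [])).flatten = _
  have hbs : pvFoldB layers ramap (layers.map fun _ => [])
      = (List.range layers.length).map
          (fun j => ramap.filter (fun p => decide (pvFirstMatch layers p.1 = some j))) := by
    apply List.ext_getElem
    · rw [pvFoldB_length]; simp
    · intro j h1 h2
      have hj : j < layers.length := by
        rw [pvFoldB_length] at h1; simpa using h1
      rw [← List.getD_eq_getElem _ [] h1]
      rw [pvFoldB_getD layers ramap _ j (by simp), pvInitGetD]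
      simp [List.getElem_range (by simpa using hj)]
  rw [hbs, ← List.flatMap_def]

theorem pvFM_cons_zero (l : String) (r : List String) (uid : String) :
    pvFirstMatch (l :: r) uid = some 0 ↔ PySem.Str.isIn l uid = true := by
  rw [pvFirstMatch]
  split_ifs with h
  · have h' : PySem.Chars.isIn l.toList uid.toList = true := by simpa using h
    simp [h']
  · constructor
    · intro hEq
      exfalso
      obtain ⟨k, hk, hk1⟩ := Option.map_eq_some_iff.mp hEq
      omega
    · intro hEq; exact absurd hEq h

theorem pvFM_append (seen : List String) (rest : List String) (uid : String) (j : Nat) :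
    pvFirstMatch (seen ++ rest) uid = some (seen.length + j)
      ↔ (pvMatchesAny seen uid = false ∧ pvFirstMatch rest uid = some j) := by
  induction seen with
  | nil => simp [pvMatchesAny]
  | cons l seen ih =>
    rw [List.cons_append, pvFirstMatch]
    split_ifs with h
    · constructor
      · intro hEq; simp at hEq; omega
      · rintro ⟨hma, -⟩
        exfalso
        simp [pvMatchesAny] at hma
        have h' : PySem.Chars.isIn l.toList uid.toList = true := by simpa using h
        rw [hma.1] at h'
        exact absurd h' (by simp)
    · rw [Option.map_eq_some_iff]
      constructor
      · rintro ⟨k, hk, hk1⟩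
        have hke : k = seen.length + j := by simp at hk1 ⊢; omega
        subst hke
        obtain ⟨hma, hfm⟩ := ih.mp hk
        refine ⟨?_, hfm⟩
        simp [pvMatchesAny] at hma ⊢
        exact ⟨by simpa using h, hma⟩
      · rintro ⟨hma, hfm⟩
        simp [pvMatchesAny] at hma
        refine ⟨seen.length + j, ih.mpr ⟨?_, hfm⟩, by simp; omega⟩
        simp [pvMatchesAny]
        exact hma.2

theorem pvAC_flat (ramap : List (String × String)) (rest : List String) :
    ∀ seen : List String,
    pvAC ramap seen rest
      = (List.range rest.length).flatMap
          (fun j => ramap.filter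
            (fun p => decide (pvFirstMatch (seen ++ rest) p.1 = some (seen.length + j)))) := by
  induction rest with
  | nil => intro seen; simp [pvAC]
  | cons l r ih =>
    intro seen
    rw [pvAC, List.length_cons, List.range_succ_eq_map, List.flatMap_cons, List.flatMap_map]
    congr 1
    · rw [pvNewly]
      apply List.filter_congr
      intro p _
      have hiff := pvFM_append seen (l :: r) p.1 0
      rw [pvFM_cons_zero, Nat.add_zero] at hiff
      by_cases hA : pvMatchesAny seen p.1 = true
      · have hno : ¬ (pvFirstMatch (seen ++ l :: r) p.1 = some seen.length) := by
          intro hc; exact absurd (hiff.mp hc).1 (by simp [hA])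
        simp [hno, hA]
      · have hA' : pvMatchesAny seen p.1 = false := by simpa using hA
        by_cases hB : PySem.Str.isIn l p.1 = true
        · have hyes : pvFirstMatch (seen ++ l :: r) p.1 = some seen.length := hiff.mpr ⟨hA', hB⟩
          simp [hyes, hA']
          simpa using hB
        · have hno : ¬ (pvFirstMatch (seen ++ l :: r) p.1 = some seen.length) := by
            intro hc; exact hB (hiff.mp hc).2
          simp [hno, (by simpa using hB : PySem.Chars.isIn l.toList p.1.toList = false)]
    · rw [ih (seen ++ [l])]
      congr 1
      funext j
      have h1 : (seen ++ [l]) ++ r = seen ++ l :: r := (List.append_cons seen l r).symm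
      have h2 : (seen ++ [l]).length + j = seen.length + (j + 1) := by simp; omega
      rw [h1, h2]

theorem retainLayers_alt_eq_pvAC (ramap : List (String × String)) (layers : List String) :
    retainLayers_alt ramap layers = pvAC ramap [] layers := by
  rw [retainLayers_alt_eq_flatMap, pvAC_flat ramap layers []]
  congr 1
  funext j
  simp

-- ===== VERDICT (by name: the statement is the Claim_ definition above) =====
theorem retainLayers_spec : Claim_equal_retainLayers := by
  intro ramap layers _ hpre
  unfold Spec_retainLayers
  rw [retainLayers_eq_pvAC ramap layers hpre.1, retainLayers_alt_eq_pvAC]
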